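-- pv_equiv track=rewrite | github.com/can4ik/HSE_MDS_23 | modules/preprocessing.py | _process_session
-- ===== SOURCE A (Python) =====
-- from typing import List, Tuple
--
-- def _process_session(events: List[Tuple[int, str, str]]) -> str:
--     '''
--     Processes events within a user session to generate a route of
--     distinct pages visited before encountering an error event.
--
--     Parameters
--     ----------
--     events : List[Tuple[int, str, str]]
--         A list of tuples, where each tuple represents an event
--         with the following fields:
--         - timestamp (int): The timestamp of the event.
--         - event_type (str): The type of event (e.g., "click", "error").
--         - event_page (str): The page associated with the event.
--
--     Returns
--     -------
--     str
--         A string representing the route taken by the user, consisting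
--         of distinct page transitions, concatenated with '-' as a delimiter.
--         The route ends before any error event, if one occurs.
--     '''
--     events = sorted(events, key=lambda x: x[0])  # Sort by timestamp
--     route = []
--     prev_event_page = None
--     error_occurred = False
--
--     for timestamp, event_type, event_page in events:
--         if 'error' in event_type.lower():
--             error_occurred = True
--
--             break  # Stop processing further events after an error
--
--         if event_page != prev_event_page:
--             route.append(event_page)
--             prev_event_page = event_page
--
--     return '-'.join(route)
-- ===== SOURCE B (Python) =====
-- from typing import List, Tuple
--
-- def _process_session(events: List[Tuple[int, str, str]]) -> str:
--     # Reverse traversal of the timestamp-sorted events: an error RESETS the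
--     # accumulator (discarding everything after it in time order) instead of
--     # breaking, and deduplication compares each page with the FOLLOWING
--     # distinct page (head of the accumulator) instead of a prev-page state.
--     acc = []
--     for _, event_type, event_page in reversed(sorted(events, key=lambda x: x[0])):
--         if 'error' in event_type.lower():
--             acc = []
--         elif not acc or acc[0] != event_page:
--             acc = [event_page, *acc]
--     return '-'.join(acc)
-- ===== Notes on version B (the rewrite author's own statement) =====
-- stated objective: alternative
-- what changed: B traverses the timestamp-sorted events in reverse, resetting the accumulator on an error event (discarding everything later in time) and deduplicating each page against the head of the accumulator, instead of A's forward loop with a prev-page state and an early break.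
import Mathlib
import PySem

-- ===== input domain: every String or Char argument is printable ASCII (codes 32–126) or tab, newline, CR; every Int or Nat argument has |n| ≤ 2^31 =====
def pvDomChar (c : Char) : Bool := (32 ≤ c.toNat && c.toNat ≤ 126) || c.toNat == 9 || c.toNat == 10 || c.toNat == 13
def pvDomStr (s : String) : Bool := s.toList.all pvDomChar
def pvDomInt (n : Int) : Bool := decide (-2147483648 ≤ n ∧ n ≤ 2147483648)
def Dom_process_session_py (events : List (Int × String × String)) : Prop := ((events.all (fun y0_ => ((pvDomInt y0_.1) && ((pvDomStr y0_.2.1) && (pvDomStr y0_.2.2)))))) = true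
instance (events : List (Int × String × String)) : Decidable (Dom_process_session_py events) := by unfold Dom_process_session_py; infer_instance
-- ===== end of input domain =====

-- B traverses the timestamp-sorted events in REVERSE: an error resets the
-- accumulator (discarding everything later in time) instead of breaking, and
-- each page is deduplicated against the following distinct page (head of the
-- accumulator) instead of a prev-page state (objective: alternative).

-- ===== PORT A =====
-- A's forward for-loop with 'break': structural recursion carrying route and prev_event_page.
def pvALoop : List (Int × String × String) → List String → Option String → List String
  | [], route, _ => route
  | (_, event_type, event_page) :: rest, route, prev =>
    if PySem.Str.isIn "error" (PySem.Str.lower event_type) then route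
    else if some event_page ≠ prev then pvALoop rest (route ++ [event_page]) (some event_page)
    else pvALoop rest route prev

def process_session_py (events : List (Int × String × String)) : String :=
  PySem.Str.join "-" (pvALoop (PySem.List.sorted events (fun x => x.1)) [] none)

-- ===== PORT B =====
-- B's loop over reversed(sorted(...)) building acc by prepending = foldr of this step.
def pvBStep (e : Int × String × String) (acc : List String) : List String :=
  if PySem.Str.isIn "error" (PySem.Str.lower e.2.1) then []
  else match acc with
    | [] => [e.2.2]
    | q :: _ => if q ≠ e.2.2 then e.2.2 :: acc else acc

def process_session_py_alt (events : List (Int × String × String)) : String :=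
  PySem.Str.join "-" ((PySem.List.sorted events (fun x => x.1)).foldr pvBStep [])

-- ===== PRECONDITION & SPEC =====
def Spec_process_session_py (events : List (Int × String × String)) (out : String) : Prop := out = process_session_py_alt events
instance (events : List (Int × String × String)) (out : String) : Decidable (Spec_process_session_py events out) := by unfold Spec_process_session_py; infer_instance

-- ===== CLAIM (what is proved, stated in full; the proofs are below) =====
def Claim_equal_process_session_py : Prop := ∀ (events : List (Int × String × String)), Dom_process_session_py events → Spec_process_session_py events (process_session_py events)

-- ===== LEMMAS AND PROOFS =====

-- Proof-side abstraction: consecutive-dedup of pages relative to a previous page.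
def pvG : List (Int × String × String) → Option String → List String
  | [], _ => []
  | e :: rest, prev =>
    if some e.2.2 ≠ prev then e.2.2 :: pvG rest (some e.2.2) else pvG rest prev

lemma pvALoop_eq_g (l : List (Int × String × String)) :
    ∀ (route : List String) (prev : Option String),
      pvALoop l route prev =
        route ++ pvG (l.takeWhile (fun e => !PySem.Str.isIn "error" (PySem.Str.lower e.2.1))) prev := by
  induction l with
  | nil => intro route prev; simp [pvALoop, pvG]
  | cons e rest ih =>
    intro route prev
    obtain ⟨t, et, ep⟩ := e
    by_cases he : PySem.Chars.isIn ['e', 'r', 'r', 'o', 'r'] (PySem.Chars.lower et.toList) = true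
    all_goals simp only [Bool.not_eq_true] at he
    · simp [pvALoop, he, pvG]
    · by_cases hp : some ep ≠ prev
      · simp [pvALoop, he, hp, pvG, ih]
      · simp [pvALoop, he, hp, pvG, ih]

-- Prepending a non-error page to a dedup-from-none equals dedup-from-that-page.
lemma pvBStep_g (e : Int × String × String)
    (he : ¬ PySem.Chars.isIn ['e', 'r', 'r', 'o', 'r'] (PySem.Chars.lower e.2.1.toList) = true)
    (tl : List (Int × String × String)) :
    pvBStep e (pvG tl none) = e.2.2 :: pvG tl (some e.2.2) := by
  cases tl with
  | nil => simp [pvBStep, he, pvG]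
  | cons f r =>
    by_cases hq : f.2.2 = e.2.2
    · simp [pvBStep, he, pvG, hq]
    · simp [pvBStep, he, pvG, hq]

lemma foldr_pvBStep_eq_g (l : List (Int × String × String)) :
    l.foldr pvBStep [] =
      pvG (l.takeWhile (fun e => !PySem.Str.isIn "error" (PySem.Str.lower e.2.1))) none := by
  induction l with
  | nil => simp [pvG]
  | cons e rest ih =>
    by_cases he : PySem.Chars.isIn ['e', 'r', 'r', 'o', 'r'] (PySem.Chars.lower e.2.1.toList) = true
    · simp [List.foldr, pvBStep, he, List.takeWhile, pvG]
    · simp only [List.foldr, ih]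
      rw [pvBStep_g e he]
      simp [List.takeWhile, he, pvG]

-- ===== VERDICT (by name: the statement is the Claim_ definition above) =====
theorem process_session_py_spec : Claim_equal_process_session_py := by
  intro events _
  unfold Spec_process_session_py process_session_py process_session_py_alt
  rw [pvALoop_eq_g, foldr_pvBStep_eq_g]
  simp
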